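-- pv_equiv track=rewrite | github.com/canonical/chisel-releases | .github/scripts/lint/lint.py | lint_sorted_contents
-- ===== SOURCE A (Python) =====
-- def is_sorted(entries: list) -> bool:
--     """
--     Return true if a list is sorted in ASCENDING order.
--     """
--     for i in range(len(entries) - 1):
--         if entries[i] > entries[i + 1]:
--             return False
--     return True
--
-- def lint_sorted_contents(yaml_data: dict) -> list[str] | None:
--     """
--     'contents' entries must be sorted in a slice.
--     """
--     slices = yaml_data["slices"]
--     errs = []
--     for key, slice in slices.items():
--         if "contents" not in slice:
--             continue
--         entries = list(slice["contents"].keys())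
--         if is_sorted(entries):
--             continue
--         errs.append(
--             f'{key}: "contents" entries are not sorted (--sorted-contents)',
--         )
--     if len(errs) > 0:
--         return errs
--     return None
-- ===== SOURCE B (Python) =====
-- def lint_sorted_contents(yaml_data: dict) -> list[str] | None:
--     """
--     'contents' entries must be sorted in a slice.
--     """
--     def bad(slice):
--         if "contents" not in slice:
--             return False
--         entries = list(slice["contents"])
--         return entries != sorted(entries)
--
--     unsorted_keys = [key for key, slice in yaml_data["slices"].items() if bad(slice)]
--     errs = [f'{key}: "contents" entries are not sorted (--sorted-contents)'
--             for key in unsorted_keys]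
--     return errs or None
-- ===== Notes on version B (the rewrite author's own statement) =====
-- stated objective: idiomatic
-- what changed: Replaced the accumulator loop with the is_sorted pairwise-scan helper by two staged comprehensions: first filter out the keys of slices whose contents keys differ from their sorted copy (sort-and-compare instead of the adjacent-pair scan), then map them to the error strings; 'return errs or None' replaces the length check.
import Mathlib
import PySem

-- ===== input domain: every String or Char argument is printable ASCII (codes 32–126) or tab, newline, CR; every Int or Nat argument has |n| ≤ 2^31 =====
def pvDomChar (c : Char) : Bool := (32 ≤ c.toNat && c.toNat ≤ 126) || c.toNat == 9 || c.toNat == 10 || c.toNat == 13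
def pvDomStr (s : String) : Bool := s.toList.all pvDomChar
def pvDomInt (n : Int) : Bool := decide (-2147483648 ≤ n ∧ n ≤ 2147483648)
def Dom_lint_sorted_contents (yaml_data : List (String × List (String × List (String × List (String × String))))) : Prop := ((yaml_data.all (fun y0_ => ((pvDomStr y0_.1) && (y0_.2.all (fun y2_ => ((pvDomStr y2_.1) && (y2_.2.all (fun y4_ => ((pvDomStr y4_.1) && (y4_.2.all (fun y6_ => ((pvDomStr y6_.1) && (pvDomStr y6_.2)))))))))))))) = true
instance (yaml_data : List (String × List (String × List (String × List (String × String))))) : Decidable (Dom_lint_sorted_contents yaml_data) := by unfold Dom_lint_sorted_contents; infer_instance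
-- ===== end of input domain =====

-- B replaces A's accumulator loop + pairwise is_sorted helper by staged comprehensions (filter the bad keys by sort-and-compare, then map to messages) and 'return errs or None' (idiomatic; return value only).

-- ===== PORT A =====
-- is_sorted: the pairwise adjacent scan with early False
def pvIsSorted : List String → Bool
  | a :: b :: rest => if a > b then false else pvIsSorted (b :: rest)
  | _ => true

def lint_sorted_contents (yaml_data : List (String × List (String × List (String × List (String × String))))) : Option (List String) :=
  match (PySem.Dict.ofList yaml_data).get? "slices" with
  | none => none   -- KeyError in Python; excluded by Pre_
  | some slices =>
    let errs := (PySem.Dict.ofList slices).items.foldl (fun errs p =>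
      -- '"contents" not in slice: continue' merged with the lookup slice["contents"] (contains ↔ get?.isSome)
      match (PySem.Dict.ofList p.2).get? "contents" with
      | none => errs
      | some c =>
        let entries := (PySem.Dict.ofList c).keys
        if pvIsSorted entries then errs
        else errs ++ [p.1 ++ ": \"contents\" entries are not sorted (--sorted-contents)"]) []
    if errs.length > 0 then some errs else none

-- ===== PORT B =====
-- bad(slice): '"contents" in slice' and the keys differ from their sorted copy
def pvBad (sl : List (String × List (String × String))) : Bool :=
  match (PySem.Dict.ofList sl).get? "contents" with
  | none => false
  | some c =>
    let entries := (PySem.Dict.ofList c).keys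
    entries != PySem.List.sorted entries (fun x => x) false

def lint_sorted_contents_alt (yaml_data : List (String × List (String × List (String × List (String × String))))) : Option (List String) :=
  match (PySem.Dict.ofList yaml_data).get? "slices" with
  | none => none   -- KeyError in Python; excluded by Pre_
  | some slices =>
    let unsorted_keys := ((PySem.Dict.ofList slices).items.filter (fun p => pvBad p.2)).map Prod.fst
    let errs := unsorted_keys.map (fun key => key ++ ": \"contents\" entries are not sorted (--sorted-contents)")
    if errs = [] then none else some errs   -- 'return errs or None'

-- ===== PRECONDITION & SPEC =====
-- Pre_ excludes exactly the inputs where yaml_data["slices"] raises KeyError.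
def Pre_lint_sorted_contents (yaml_data : List (String × List (String × List (String × List (String × String))))) : Prop :=
  "slices" ∈ yaml_data.map Prod.fst
instance (yaml_data : List (String × List (String × List (String × List (String × String))))) : Decidable (Pre_lint_sorted_contents yaml_data) := by unfold Pre_lint_sorted_contents; infer_instance
def pvWitness_lint_sorted_contents : (List (String × List (String × List (String × List (String × String))))) := [("slices", [("s1", [("contents", [("a", "x"), ("b", "y")])])])]
def Spec_lint_sorted_contents (yaml_data : List (String × List (String × List (String × List (String × String))))) (out : Option (List String)) : Prop := out = lint_sorted_contents_alt yaml_data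
instance (yaml_data : List (String × List (String × List (String × List (String × String))))) (out : Option (List String)) : Decidable (Spec_lint_sorted_contents yaml_data out) := by unfold Spec_lint_sorted_contents; infer_instance

-- ===== CLAIM =====
def Claim_equal_lint_sorted_contents : Prop := ∀ (yaml_data : List (String × List (String × List (String × List (String × String))))), Dom_lint_sorted_contents yaml_data → Pre_lint_sorted_contents yaml_data → Spec_lint_sorted_contents yaml_data (lint_sorted_contents yaml_data)

-- ===== LEMMAS AND PROOFS =====

lemma pvIsSorted_iff_pairwise (l : List String) : pvIsSorted l = true ↔ l.Pairwise (· ≤ ·) := by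
  rw [← List.isChain_iff_pairwise]
  induction l with
  | nil => simp [pvIsSorted]
  | cons a t ih =>
    cases t with
    | nil => simp [pvIsSorted]
    | cons b r =>
      simp only [pvIsSorted, List.isChain_cons_cons, ← ih]
      by_cases hab : a > b
      · simp [hab, not_le_of_gt hab]
      · simp [hab, le_of_not_gt hab]

lemma pvIsSorted_iff_sorted (l : List String) :
    pvIsSorted l = true ↔ l = PySem.List.sorted l (fun x => x) false := by
  rw [pvIsSorted_iff_pairwise]
  constructor
  · intro h
    exact (PySem.List.sorted_eq_self_of_pairwise l (fun x => x) h).symm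
  · intro h
    have := PySem.List.sorted_pairwise (xs := l) (key := fun x : String => x)
    rwa [← h] at this

-- A's per-item skip condition is the negation of B's 'bad' predicate.
lemma pvBad_char (p : String × List (String × List (String × String))) :
    (match (PySem.Dict.ofList p.2).get? "contents" with
      | none => true
      | some c => pvIsSorted (PySem.Dict.ofList c).keys) = !(pvBad p.2) := by
  unfold pvBad
  cases h : (PySem.Dict.ofList p.2).get? "contents" with
  | none => simp
  | some c =>
    simp only [bne, Bool.not_not]
    by_cases hks : (PySem.Dict.ofList c).keys = PySem.List.sorted (PySem.Dict.ofList c).keys (fun x => x) false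
    · rw [(pvIsSorted_iff_sorted _).mpr hks]
      exact (beq_iff_eq.mpr hks).symm
    · have h1 : pvIsSorted (PySem.Dict.ofList c).keys = false :=
        Bool.eq_false_iff.mpr (fun ht => hks ((pvIsSorted_iff_sorted _).mp ht))
      rw [h1]
      exact (beq_eq_false_iff_ne.mpr hks).symm

-- A's fold equals the accumulator followed by B's filter-then-map comprehension.
lemma foldl_eq_filter_map (l : List (String × List (String × List (String × String)))) (acc : List String) :
    l.foldl (fun errs p =>
      match (PySem.Dict.ofList p.2).get? "contents" with
      | none => errs
      | some c =>
        let entries := (PySem.Dict.ofList c).keys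
        if pvIsSorted entries then errs
        else errs ++ [p.1 ++ ": \"contents\" entries are not sorted (--sorted-contents)"]) acc
    = acc ++ ((l.filter (fun p => pvBad p.2)).map Prod.fst).map
        (fun key => key ++ ": \"contents\" entries are not sorted (--sorted-contents)") := by
  induction l generalizing acc with
  | nil => simp
  | cons p t ih =>
    have hc := pvBad_char p
    simp only [List.foldl_cons, List.filter_cons]
    cases hb : pvBad p.2 with
    | false =>
      rw [hb] at hc
      simp only [Bool.not_false] at hc
      cases h : (PySem.Dict.ofList p.2).get? "contents" with
      | none => simpa using ih acc
      | some c =>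
        rw [h] at hc
        simp only [] at hc
        simp only [Bool.false_eq_true, if_false, hc, if_true]
        exact ih acc
    | true =>
      rw [hb] at hc
      simp only [Bool.not_true] at hc
      cases h : (PySem.Dict.ofList p.2).get? "contents" with
      | none => rw [h] at hc; simp at hc
      | some c =>
        rw [h] at hc
        simp only [] at hc
        simp only [if_true, List.map_cons, hc, Bool.false_eq_true, if_false]
        rw [ih]
        simp

theorem lint_sorted_contents_spec_aux :
    ∀ yaml_data, lint_sorted_contents yaml_data = lint_sorted_contents_alt yaml_data := by
  intro ys
  unfold lint_sorted_contents lint_sorted_contents_alt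
  cases h : (PySem.Dict.ofList ys).get? "slices" with
  | none => rfl
  | some slices =>
    simp only
    rw [foldl_eq_filter_map]
    simp only [List.nil_append]
    set e := ((((PySem.Dict.ofList slices).items.filter (fun p => pvBad p.2)).map Prod.fst).map
        (fun key => key ++ ": \"contents\" entries are not sorted (--sorted-contents)")) with he
    cases e with
    | nil => simp
    | cons x t => simp

-- ===== VERDICT =====
theorem lint_sorted_contents_spec : Claim_equal_lint_sorted_contents := by
  intro ys _ _
  unfold Spec_lint_sorted_contents
  exact lint_sorted_contents_spec_aux ys
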